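-- pv_equiv track=rewrite | github.com/iaqool/tothemoon | scraper.py | resolve_chain
-- ===== SOURCE A (Python) =====
-- CHAIN_MAP = {
--     "solana": "Solana",
--     "the-open-network": "TON",
--     "base": "Base",
--     "ethereum": "Ethereum",
--     "binance-smart-chain": "BNB Chain",
--     "tron": "Tron",
--     "arbitrum-one": "Arbitrum",
--     "polygon-pos": "Polygon",
--     "celo": "Celo",
--     "stellar": "Stellar",
--     "optimistic-ethereum": "Optimism",
--     "injective-protocol": "Injective",
-- }
--
-- PRIORITY_CHAINS = {"Solana", "TON", "Base"}
--
-- def resolve_chain(platforms: dict) -> tuple[str | None, bool]: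
--     """Возвращает (chain_name, is_priority) по словарю platforms монеты."""
--     # Сначала смотрим приоритетные сети
--     for pid, name in CHAIN_MAP.items():
--         if pid in platforms and name in PRIORITY_CHAINS:
--             return name, True
--     # Потом поддерживаемые
--     for pid, name in CHAIN_MAP.items():
--         if pid in platforms:
--             return name, False
--     return None, False
-- ===== SOURCE B (Python) =====
-- CHAIN_MAP = {
--     "solana": "Solana",
--     "the-open-network": "TON",
--     "base": "Base",
--     "ethereum": "Ethereum",
--     "binance-smart-chain": "BNB Chain",
--     "tron": "Tron",
--     "arbitrum-one": "Arbitrum",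
--     "polygon-pos": "Polygon",
--     "celo": "Celo",
--     "stellar": "Stellar",
--     "optimistic-ethereum": "Optimism",
--     "injective-protocol": "Injective",
-- }
--
-- PRIORITY_CHAINS = {"Solana", "TON", "Base"}
--
-- def resolve_chain(platforms: dict) -> tuple[str | None, bool]:
--     # Single pass: the priority chains occupy the front of CHAIN_MAP, so the
--     # first chain present is a priority chain iff any priority chain is present.
--     for pid, name in CHAIN_MAP.items():
--         if pid in platforms:
--             return name, name in PRIORITY_CHAINS
--     return None, False
-- ===== Notes on version B (the rewrite author's own statement) =====
-- stated objective: simpler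
-- what changed: Replaces A's two ordered scans of CHAIN_MAP (priority pass, then supported pass) by one single pass that returns the first chain present together with its priority flag, relying on the priority chains sitting at the front of CHAIN_MAP.
import Mathlib
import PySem

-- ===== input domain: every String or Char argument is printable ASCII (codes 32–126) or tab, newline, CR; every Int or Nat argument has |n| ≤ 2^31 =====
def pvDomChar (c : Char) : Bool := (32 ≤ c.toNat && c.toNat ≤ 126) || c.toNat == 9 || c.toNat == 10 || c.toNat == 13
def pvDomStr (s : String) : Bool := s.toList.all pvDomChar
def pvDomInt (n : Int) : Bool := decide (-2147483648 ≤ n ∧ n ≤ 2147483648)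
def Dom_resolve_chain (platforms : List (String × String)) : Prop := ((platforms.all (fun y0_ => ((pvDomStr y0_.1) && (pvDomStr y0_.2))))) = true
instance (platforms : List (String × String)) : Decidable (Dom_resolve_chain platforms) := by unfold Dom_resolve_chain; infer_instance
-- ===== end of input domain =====

-- B changes: one single pass over CHAIN_MAP returning (name, name ∈ PRIORITY_CHAINS) for the
-- first pid present, instead of A's two ordered scans (priority pass, then supported pass);
-- objective: simpler.

-- ===== PORT A =====
def chainMap : List (String × String) :=
  [("solana", "Solana"), ("the-open-network", "TON"), ("base", "Base"),
   ("ethereum", "Ethereum"), ("binance-smart-chain", "BNB Chain"), ("tron", "Tron"),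
   ("arbitrum-one", "Arbitrum"), ("polygon-pos", "Polygon"), ("celo", "Celo"),
   ("stellar", "Stellar"), ("optimistic-ethereum", "Optimism"),
   ("injective-protocol", "Injective")]

def priorityChains : List String := ["Solana", "TON", "Base"]

-- 'pid in platforms' for a Python dict: membership among the keys
def hasKey (platforms : List (String × String)) (pid : String) : Bool :=
  platforms.any (fun kv => kv.1 == pid)

-- first loop of A: priority pass
def loopPriority (platforms : List (String × String)) :
    List (String × String) → Option (String × Bool)
  | [] => none
  | (pid, name) :: rest =>
      if hasKey platforms pid && priorityChains.contains name then some (name, true)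
      else loopPriority platforms rest

-- second loop of A: supported pass
def loopSupported (platforms : List (String × String)) :
    List (String × String) → Option (String × Bool)
  | [] => none
  | (pid, name) :: rest =>
      if hasKey platforms pid then some (name, false)
      else loopSupported platforms rest

def resolve_chain (platforms : List (String × String)) : Option String × Bool :=
  match loopPriority platforms chainMap with
  | some (name, b) => (some name, b)
  | none =>
    match loopSupported platforms chainMap with
    | some (name, b) => (some name, b)
    | none => (none, false)

-- ===== PORT B =====
def loopSingle (platforms : List (String × String)) :
    List (String × String) → Option String × Bool
  | [] => (none, false)
  | (pid, name) :: rest =>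
      if hasKey platforms pid then (some name, priorityChains.contains name)
      else loopSingle platforms rest

def resolve_chain_alt (platforms : List (String × String)) : Option String × Bool :=
  loopSingle platforms chainMap

-- ===== PRECONDITION & SPEC =====
def Spec_resolve_chain (platforms : List (String × String)) (out : Option String × Bool) : Prop := out = resolve_chain_alt platforms
instance (platforms : List (String × String)) (out : Option String × Bool) : Decidable (Spec_resolve_chain platforms out) := by unfold Spec_resolve_chain; infer_instance

-- ===== CLAIM (what is proved, stated in full; the proofs are below) =====
def Claim_equal_resolve_chain : Prop := ∀ (platforms : List (String × String)), Dom_resolve_chain platforms → Spec_resolve_chain platforms (resolve_chain platforms)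

-- ===== LEMMAS AND PROOFS =====

-- if no entry's name is a priority chain, the priority pass finds nothing
theorem loopPriority_none (pl : List (String × String)) (l : List (String × String))
    (h : ∀ e ∈ l, priorityChains.contains e.2 = false) :
    loopPriority pl l = none := by
  induction l with
  | nil => rfl
  | cons e rest ih =>
    obtain ⟨pid, name⟩ := e
    simp only [loopPriority]
    rw [h (pid, name) (by simp), Bool.and_false]
    simpa using ih (fun e he => h e (List.mem_cons_of_mem _ he))

-- the key invariant of CHAIN_MAP: priority names come before non-priority names.
-- Under it, A's two passes compute exactly B's single pass.
theorem two_pass_eq_single (pl : List (String × String)) (l : List (String × String))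
    (h : l.Pairwise (fun a b => priorityChains.contains b.2 = true → priorityChains.contains a.2 = true)) :
    (match loopPriority pl l with
     | some (name, b) => (some name, b)
     | none =>
       match loopSupported pl l with
       | some (name, b) => (some name, b)
       | none => ((none : Option String), false))
    = loopSingle pl l := by
  induction l with
  | nil => rfl
  | cons e rest ih =>
    obtain ⟨pid, name⟩ := e
    rw [List.pairwise_cons] at h
    obtain ⟨hhead, hrest⟩ := h
    by_cases hk : hasKey pl pid
    · by_cases hc : name ∈ priorityChains
      · simp [loopPriority, loopSingle, hk, hc]
      · have hnone : loopPriority pl rest = none := by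
          refine loopPriority_none pl rest (fun e he => ?_)
          by_contra hne
          exact hc (by simpa using hhead e he (by simpa using hne))
        simp [loopPriority, loopSupported, loopSingle, hk, hc, hnone]
    · simp only [loopPriority, loopSupported, loopSingle, hk, Bool.false_and]
      exact ih hrest

-- ===== VERDICT (by name: the statement is the Claim_ definition above) =====
theorem resolve_chain_spec : Claim_equal_resolve_chain := by
  intro platforms _
  unfold Spec_resolve_chain resolve_chain resolve_chain_alt
  exact two_pass_eq_single platforms chainMap (by decide)
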